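-- pv_equiv track=rewrite | github.com/siberianstrength/PerfLab | task1/task1.py | circular_array_path
-- ===== SOURCE A (Python) =====
-- def circular_array_path(n, m):
--     """
--     Создать круговой массив и вывести его путь
--
--     Parameters
--     ----------
--     n : INT
--     m : INT
--
--     Returns
--     -------
--     STR
--         Возвращает путь в виде строки.
--
--     """
--     # Круговой массив задаётся лишь от 1:n+1
--     # т.к. это позволит не убить программу в случае, если n очень велико
--     # (i.e. n = 10e20).
--     array = [i for i in range(1, n + 1)]
--     result_path = [array[0]]
--
--     idx = 0
--     # Добавление элемента по индексу.
--     # Предусмотрен кейс, когда m > n.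
--     while True:
--         idx = (idx + m - 1) % n
--         if array[idx] == array[0]:
--             break
--         result_path.append(array[idx])
--
--     return ''.join(map(str, result_path))
-- ===== SOURCE B (Python) =====
-- def circular_array_path(n, m):
--     # Closed-form cycle: step = (m-1) % n, orbit length L = n // gcd(n, step);
--     # emit the L visited values directly instead of walking until return.
--     step = (m - 1) % n
--     a, b = n, step
--     while b:
--         a, b = b, a % b
--     L = n // a
--     return ''.join(str(k * step % n + 1) for k in range(L))
-- ===== Notes on version B (the rewrite author's own statement) =====
-- stated objective: faster
-- what changed: Instead of walking the materialised circular array and appending visited values until the start value reappears, B computes the step (m-1) mod n and the orbit length L = n // gcd(n, step) in closed form and emits the L visited values 1 + k*step mod n in one fixed-length generation pass.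
import Mathlib
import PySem

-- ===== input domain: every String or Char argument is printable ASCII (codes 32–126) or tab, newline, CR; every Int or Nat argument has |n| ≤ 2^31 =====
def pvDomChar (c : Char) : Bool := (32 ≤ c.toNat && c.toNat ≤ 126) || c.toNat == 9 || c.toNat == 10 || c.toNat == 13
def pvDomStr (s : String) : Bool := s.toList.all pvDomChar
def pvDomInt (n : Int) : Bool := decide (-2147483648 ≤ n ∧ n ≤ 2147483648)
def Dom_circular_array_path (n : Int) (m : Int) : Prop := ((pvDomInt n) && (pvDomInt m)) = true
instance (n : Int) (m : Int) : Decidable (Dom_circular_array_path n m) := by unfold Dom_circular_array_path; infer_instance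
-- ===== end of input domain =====

-- B replaces A's walk-until-return over a materialised array by the closed-form orbit length L = n // gcd(n, (m-1) % n) and one fixed-length generation pass (measured faster in a timing run).


-- ===== PORT A =====
-- A's `while True` walk; fuel n.toNat suffices since the walk returns to index 0
-- after at most n steps (proved in the lemmas below).
def pvLoopA (array : List Int) (a0 : Int) (n m : Int) : Nat → Int → List Int → List Int
  | 0, _, acc => acc
  | f+1, idx, acc =>
    let idx' := PySem.Int.mod (idx + m - 1) n
    match PySem.List.pyGet? array idx' with
    | none => acc   -- IndexError (unreachable under Pre_)
    | some v => if v = a0 then acc else pvLoopA array a0 n m f idx' (acc ++ [v])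

def circular_array_path (n : Int) (m : Int) : String :=
  let array := PySem.List.pyRange 1 (n + 1) 1
  match PySem.List.pyGet? array 0 with
  | none => ""   -- IndexError on array[0] (n ≤ 0): excluded by Pre_
  | some a0 =>
    PySem.Str.join "" ((pvLoopA array a0 n m n.toNat 0 [a0]).map PySem.Int.toStr)

-- ===== PORT B =====
-- B's hand-written Euclid loop `while b: a, b = b, a % b` (Python %).
theorem pvGcd_dec (a b : Int) (h : ¬ b = 0) : (PySem.Int.mod a b).natAbs < b.natAbs := by
  rcases lt_or_gt_of_ne h with hb | hb
  · have h1 := PySem.Int.mod_neg_bounds a hb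
    omega
  · have h1 := PySem.Int.mod_nonneg a hb
    have h2 := PySem.Int.mod_lt a hb
    omega

def pvGcdLoop (a b : Int) : Int :=
  if h : b = 0 then a else pvGcdLoop b (PySem.Int.mod a b)
termination_by b.natAbs
decreasing_by exact pvGcd_dec a b h

def circular_array_path_alt (n : Int) (m : Int) : String :=
  let step := PySem.Int.mod (m - 1) n
  let L := PySem.Int.floordiv n (pvGcdLoop n step)
  PySem.Str.join ""
    ((PySem.List.pyRange 0 L 1).map (fun k => PySem.Int.toStr (PySem.Int.mod (k * step) n + 1)))

-- ===== PRECONDITION & SPEC =====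
-- Pre_ excludes exactly n ≤ 0, where Python A raises IndexError on array[0] (and B raises too).
def Pre_circular_array_path (n : Int) (m : Int) : Prop := 1 ≤ n
instance (n : Int) (m : Int) : Decidable (Pre_circular_array_path n m) := by unfold Pre_circular_array_path; infer_instance
def pvWitness_circular_array_path : Int × Int := (5, 3)

def Spec_circular_array_path (n : Int) (m : Int) (out : String) : Prop := out = circular_array_path_alt n m
instance (n : Int) (m : Int) (out : String) : Decidable (Spec_circular_array_path n m out) := by unfold Spec_circular_array_path; infer_instance

-- ===== CLAIM (what is proved, stated in full; the proofs are below) =====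
def Claim_equal_circular_array_path : Prop := ∀ (n : Int) (m : Int), Dom_circular_array_path n m → Pre_circular_array_path n m → Spec_circular_array_path n m (circular_array_path n m)

-- ===== LEMMAS AND PROOFS =====

-- the orbit of 0 under +s in Z/N returns to 0 exactly at multiples of N / gcd N s
theorem pvOrbit (N s : ℕ) (hN : N ≠ 0) (k : ℕ) :
    k * s % N = 0 ↔ (N / Nat.gcd N s) ∣ k := by
  have h1 : k * s % N = 0 ↔ ((k * s : ℕ) : ZMod N) = 0 := by
    rw [ZMod.natCast_eq_zero_iff, Nat.dvd_iff_mod_eq_zero]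
  have h2 : ((k * s : ℕ) : ZMod N) = k • ((s : ℕ) : ZMod N) := by
    push_cast
    rw [nsmul_eq_mul]
  have h3 : addOrderOf ((s : ℕ) : ZMod N) = N / Nat.gcd N s := ZMod.addOrderOf_coe s hN
  rw [h1, h2, ← addOrderOf_dvd_iff_nsmul_eq_zero, h3]

-- reading the circular array [1 .. n] at an in-range index
theorem pvGetArr (n : Int) (i : Int) (h0 : 0 ≤ i) (h1 : i < n) :
    PySem.List.pyGet? (PySem.List.pyRange 1 (n + 1) 1) i = some (i + 1) := by
  have hi : i = ((i.toNat : ℕ) : Int) := (Int.toNat_of_nonneg h0).symm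
  rw [hi, PySem.List.pyGet?_natCast, PySem.List.pyRange_one]
  have hlt : i.toNat < (n + 1 - 1).toNat := by omega
  rw [List.getElem?_map, List.getElem?_range hlt]
  simp
  omega

-- one step of A's index update, in terms of k ↦ k*s % N
theorem pvStep (n m : Int) (N s j : ℕ) (hn : 1 ≤ n) (hNn : (N : Int) = n)
    (hs : PySem.Int.mod (m - 1) n = (s : Int)) :
    PySem.Int.mod ((↑(j * s % N) : Int) + m - 1) n = (↑((j + 1) * s % N) : Int) := by
  have hnpos : (0 : Int) < n := by omega
  have hN0 : N ≠ 0 := by omega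
  rw [PySem.Int.mod_eq_emod_of_pos hnpos]
  have hms : (m - 1) % n = (s : Int) := by
    rw [← PySem.Int.mod_eq_emod_of_pos hnpos, hs]
  have e1 : (↑(j * s % N) : Int) + m - 1 = (↑(j * s % N) : Int) + (m - 1) := by ring
  rw [e1, Int.add_emod, hms]
  have e2 : ((↑(j * s % N) : Int)) % n = (↑(j * s % N) : Int) := by
    apply Int.emod_eq_of_lt
    · positivity
    · have : j * s % N < N := Nat.mod_lt _ (by omega)
      omega
  rw [e2, ← hNn]
  have e3 : ((↑(j * s % N) : Int) + (s : Int)) = ((j * s % N + s : ℕ) : Int) := by push_cast; ring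
  rw [e3, ← Int.natCast_emod]
  congr 1
  rw [Nat.mod_add_mod]
  ring_nf

-- the loop invariant: at index (j*s) % N with the break still L - (j+1) appends away,
-- A's loop appends exactly the values 1 + (t*s % N) for t = j+1, …, L-1
theorem pvLoop (n m : Int) (N s : ℕ) (hn : 1 ≤ n) (hNn : (N : Int) = n)
    (hs : PySem.Int.mod (m - 1) n = (s : Int)) :
    ∀ (f j : ℕ) (acc : List Int), j < N / Nat.gcd N s → N / Nat.gcd N s ≤ j + f →
      pvLoopA (PySem.List.pyRange 1 (n + 1) 1) 1 n m f (↑(j * s % N)) acc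
        = acc ++ (List.range' (j + 1) (N / Nat.gcd N s - (j + 1))).map
            (fun t => (↑(t * s % N) : Int) + 1) := by
  intro f
  have hN0 : N ≠ 0 := by omega
  induction f with
  | zero => intro j acc h1 h2; omega
  | succ f ih =>
    intro j acc h1 h2
    simp only [pvLoopA]
    rw [pvStep n m N s j hn hNn hs]
    have hlt : (j + 1) * s % N < N := Nat.mod_lt _ (by omega)
    rw [pvGetArr n _ (by positivity) (by omega)]
    simp only []
    by_cases hj : j + 1 = N / Nat.gcd N s
    · have hz : (j + 1) * s % N = 0 := (pvOrbit N s hN0 (j + 1)).mpr (hj ▸ dvd_refl _)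
      rw [hz]
      simp [hj]
    · have hjlt : j + 1 < N / Nat.gcd N s := by omega
      have hnz : (j + 1) * s % N ≠ 0 := by
        intro hz
        have hdvd := (pvOrbit N s hN0 (j + 1)).mp hz
        have := Nat.le_of_dvd (by omega) hdvd
        omega
      have hcond : ¬ ((↑((j + 1) * s % N) : Int) + 1 = 1) := by
        intro h
        apply hnz
        omega
      rw [if_neg hcond]
      rw [ih (j + 1) (acc ++ [(↑((j + 1) * s % N) : Int) + 1]) hjlt (by omega)]
      have hsplit : List.range' (j + 1) (N / Nat.gcd N s - (j + 1))
          = (j + 1) :: List.range' (j + 2) (N / Nat.gcd N s - (j + 2)) := by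
        have : N / Nat.gcd N s - (j + 1) = (N / Nat.gcd N s - (j + 2)) + 1 := by omega
        rw [this, List.range'_succ]
      rw [hsplit]
      simp

-- B's Euclid loop computes Nat.gcd on nonnegative inputs
theorem pvGcdLoop_eq : ∀ (b a : ℕ), pvGcdLoop (a : Int) (b : Int) = (Nat.gcd a b : Int) := by
  intro b
  induction b using Nat.strong_induction_on with
  | _ b ih =>
    intro a
    rw [pvGcdLoop]
    by_cases hb : b = 0
    · subst hb; simp
    · rw [dif_neg (by exact_mod_cast hb)]
      rw [PySem.Int.mod_natCast]
      rw [ih (a % b) (Nat.mod_lt _ (by omega)) b]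
      rw [Nat.gcd_comm a b, Nat.gcd_rec b a, Nat.gcd_comm (a % b) b]

-- the shared closed form of both programs' output lists
theorem pvA_eq (n m : Int) (hn : 1 ≤ n) :
    circular_array_path n m
      = PySem.Str.join "" ((List.range (n.toNat / Nat.gcd n.toNat (PySem.Int.mod (m - 1) n).toNat)).map
          (fun t => PySem.Int.toStr ((↑(t * (PySem.Int.mod (m - 1) n).toNat % n.toNat) : Int) + 1))) := by
  have hnpos : (0 : Int) < n := by omega
  set N := n.toNat with hNdef
  set s := (PySem.Int.mod (m - 1) n).toNat with hsdef
  have hNn : (N : Int) = n := Int.toNat_of_nonneg (by omega)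
  have hs : PySem.Int.mod (m - 1) n = (s : Int) :=
    (Int.toNat_of_nonneg (PySem.Int.mod_nonneg _ hnpos)).symm
  have hN0 : N ≠ 0 := by omega
  have hgcdpos : 0 < Nat.gcd N s := Nat.gcd_pos_of_pos_left s (by omega)
  set L := N / Nat.gcd N s with hLdef
  have hL1 : 1 ≤ L := by
    rw [hLdef]
    exact Nat.one_le_div_iff hgcdpos |>.mpr (Nat.gcd_le_left s (by omega))
  have hLN : L ≤ N := Nat.div_le_self _ _
  simp only [circular_array_path]
  rw [pvGetArr n 0 le_rfl hnpos]
  simp only []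
  have h00 : (0 : Int) = (↑(0 * s % N) : Int) := by simp
  have hzplus : (0 : Int) + 1 = (1 : Int) := by norm_num
  rw [hzplus, h00, pvLoop n m N s hn hNn hs N 0 [(1 : Int)] (by omega) (by omega)]
  congr 1
  have hr : List.range L = 0 :: List.range' 1 (L - 1) := by
    conv_lhs => rw [List.range_eq_range', show L = (L - 1) + 1 from by omega, List.range'_succ]
  rw [hr]
  simp [Function.comp, ← hLdef]

theorem pvB_eq (n m : Int) (hn : 1 ≤ n) :
    circular_array_path_alt n m
      = PySem.Str.join "" ((List.range (n.toNat / Nat.gcd n.toNat (PySem.Int.mod (m - 1) n).toNat)).map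
          (fun t => PySem.Int.toStr ((↑(t * (PySem.Int.mod (m - 1) n).toNat % n.toNat) : Int) + 1))) := by
  have hnpos : (0 : Int) < n := by omega
  set N := n.toNat with hNdef
  set s := (PySem.Int.mod (m - 1) n).toNat with hsdef
  have hNn : (N : Int) = n := Int.toNat_of_nonneg (by omega)
  have hs : PySem.Int.mod (m - 1) n = (s : Int) :=
    (Int.toNat_of_nonneg (PySem.Int.mod_nonneg _ hnpos)).symm
  simp only [circular_array_path_alt]
  rw [hs, ← hNn, pvGcdLoop_eq s N, PySem.Int.floordiv_natCast, PySem.List.pyRange_zero_natCast]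
  rw [List.map_map]
  congr 1
  apply List.map_congr_left
  intro k _
  simp only [Function.comp]
  rw [show ((k : Int) * (s : Int)) = ((k * s : ℕ) : Int) by push_cast; ring]
  rw [PySem.Int.mod_natCast]

theorem pv_main : ∀ (n m : Int), 1 ≤ n → circular_array_path n m = circular_array_path_alt n m := by
  intro n m hn
  rw [pvA_eq n m hn, pvB_eq n m hn]

-- ===== VERDICT (by name: the statement is the Claim_ definition above) =====
theorem circular_array_path_spec : Claim_equal_circular_array_path := by
  intro n m _ hpre
  exact pv_main n m hpre
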